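-- pv_equiv track=rewrite | github.com/LaRiffle/elisabeth-project | utils.py | compute_fringes_from_profile
-- ===== SOURCE A (Python) =====
-- def compute_fringes_from_profile(detection):
--     fringes = []
--     for i in range(len(detection)):
--         # saving start of anomaly with default end
--         if detection[i] > 128 and (i == 0 or detection[i-1] <= 128):
--             fringes.append([i, len(detection)-1])
--         # saving end of anomaly in last elmt
--         if detection[i] <= 128 and detection[i-1] > 128:
--             if(len(fringes)-1 >= 0):
--                 fringes[len(fringes)-1][1] = i
--     return fringes
-- ===== SOURCE B (Python) =====
-- def compute_fringes_from_profile(detection):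
--     n = len(detection)
--     fringes = []
--     i = 0
--     while i < n:
--         if detection[i] > 128:
--             s = i
--             while i < n and detection[i] > 128:
--                 i += 1
--             # run occupied [s, i-1]; closed runs record the first index after the run
--             fringes.append([s, n - 1] if i == n else [s, i])
--         else:
--             i += 1
--     return fringes
-- ===== Notes on version B (the rewrite author's own statement) =====
-- stated objective: idiomatic
-- what changed: Replaced A's per-index edge detection (comparing each element with its predecessor and mutating the last appended pair) with a run-scanner: an outer while skips sub-threshold elements and an inner while consumes each >128 run, appending the finished [start,end] pair once.
import Mathlib
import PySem

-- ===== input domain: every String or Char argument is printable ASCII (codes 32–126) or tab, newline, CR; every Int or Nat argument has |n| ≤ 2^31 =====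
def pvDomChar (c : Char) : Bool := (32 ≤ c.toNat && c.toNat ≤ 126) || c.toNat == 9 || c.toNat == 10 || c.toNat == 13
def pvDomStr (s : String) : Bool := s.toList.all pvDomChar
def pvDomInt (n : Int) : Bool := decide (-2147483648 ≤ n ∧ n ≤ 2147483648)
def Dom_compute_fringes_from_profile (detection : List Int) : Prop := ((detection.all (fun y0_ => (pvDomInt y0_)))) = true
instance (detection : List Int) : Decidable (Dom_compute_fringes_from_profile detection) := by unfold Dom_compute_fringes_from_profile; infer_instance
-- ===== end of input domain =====

-- B is an idiomatic run-scanner (skip/consume whiles) replacing A's predecessor-comparison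
-- edge detection with in-place mutation of the last pair; same O(n) cost, return value proved equal.

-- ===== PORT A =====
-- one iteration of A's for-loop body (fringes is the accumulator, i the Python loop index)
def aStep (xs : List Int) (fringes : List (List Int)) (i : Int) : List (List Int) :=
  let fringes :=
    if PySem.List.pyGetD xs i 0 > 128 ∧ (i = 0 ∨ PySem.List.pyGetD xs (i - 1) 0 ≤ 128)
    then fringes ++ [[i, (xs.length : Int) - 1]] else fringes
  if PySem.List.pyGetD xs i 0 ≤ 128 ∧ PySem.List.pyGetD xs (i - 1) 0 > 128 then
    if (fringes.length : Int) - 1 ≥ 0 then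
      -- fringes[len(fringes)-1][1] = i  (set index 1 of the last pair)
      fringes.dropLast ++ [(fringes.getLastD []).set 1 i]
    else fringes
  else fringes

def compute_fringes_from_profile (detection : List Int) : List (List Int) :=
  (PySem.List.pyRange 0 (detection.length : Int) 1).foldl (aStep detection) []

-- ===== PORT B =====
-- inner while: advance i while i < n and detection[i] > 128
def bScan (xs : List Int) (n i : Nat) : Nat :=
  if h : i < n ∧ xs.getD i 0 > 128 then bScan xs n (i + 1) else i
termination_by n - i
decreasing_by omega

theorem bScan_ge (xs : List Int) (n i : Nat) : i ≤ bScan xs n i := by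
  unfold bScan
  split
  · exact le_trans (Nat.le_succ i) (bScan_ge xs n (i + 1))
  · exact le_refl i
termination_by n - i
decreasing_by omega

theorem bScan_lt (xs : List Int) (n i : Nat) (h1 : i < n) (h2 : xs.getD i 0 > 128) :
    i < bScan xs n i := by
  unfold bScan
  rw [dif_pos ⟨h1, h2⟩]
  exact Nat.lt_of_lt_of_le (Nat.lt_succ_self i) (bScan_ge xs n (i + 1))

-- outer while of B; each finished run [s, i-1] is emitted as one pair
def bLoop (xs : List Int) (n i : Nat) : List (List Int) :=
  if h : i < n then
    if h2 : xs.getD i 0 > 128 then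
      (if bScan xs n i = n then [(i : Int), (n : Int) - 1]
       else [(i : Int), ((bScan xs n i : Nat) : Int)]) :: bLoop xs n (bScan xs n i)
    else bLoop xs n (i + 1)
  else []
termination_by n - i
decreasing_by
  · have := bScan_lt xs n i h h2; omega
  · omega

def compute_fringes_from_profile_alt (detection : List Int) : List (List Int) :=
  bLoop detection detection.length 0

-- ===== PRECONDITION & SPEC =====
def Spec_compute_fringes_from_profile (detection : List Int) (out : List (List Int)) : Prop := out = compute_fringes_from_profile_alt detection
instance (detection : List Int) (out : List (List Int)) : Decidable (Spec_compute_fringes_from_profile detection out) := by unfold Spec_compute_fringes_from_profile; infer_instance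

-- ===== CLAIM (what is proved, stated in full; the proofs are below) =====
def Claim_equal_compute_fringes_from_profile : Prop := ∀ (detection : List Int), Dom_compute_fringes_from_profile detection → Spec_compute_fringes_from_profile detection (compute_fringes_from_profile detection)

-- ===== LEMMAS AND PROOFS =====

theorem bScan_le (xs : List Int) (n i : Nat) (h : i ≤ n) : bScan xs n i ≤ n := by
  unfold bScan
  split
  · rename_i h2; exact bScan_le xs n (i + 1) h2.1
  · exact h
termination_by n - i
decreasing_by omega

theorem bScan_stop (xs : List Int) (n i : Nat) (h : ¬ (i < n ∧ xs.getD i 0 > 128)) :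
    bScan xs n i = i := by
  unfold bScan; rw [dif_neg h]

theorem bScan_step (xs : List Int) (n i : Nat) (h1 : i < n) (h2 : xs.getD i 0 > 128) :
    bScan xs n i = bScan xs n (i + 1) := by
  conv_lhs => unfold bScan
  rw [dif_pos ⟨h1, h2⟩]

theorem pvCastPred (j : Nat) : ((j + 1 : Nat) : Int) - 1 = (j : Int) := by push_cast; ring

-- step evaluations: a run starts at i (append with default end)
theorem aStep_start (xs : List Int) (fr : List (List Int)) (i : Nat)
    (hgt : xs.getD i 0 > 128)
    (hprev : (i : Int) = 0 ∨ PySem.List.pyGetD xs ((i : Int) - 1) 0 ≤ 128) :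
    aStep xs fr (i : Int) = fr ++ [[(i : Int), (xs.length : Int) - 1]] := by
  have hxi : PySem.List.pyGetD xs (i : Int) 0 = xs.getD i 0 := PySem.List.pyGetD_natCast xs i 0
  simp only [aStep]
  rw [hxi]
  split_ifs <;> first | rfl | omega

-- inside a run, the element is still high: no change
theorem aStep_noop_high (xs : List Int) (fr : List (List Int)) (j : Nat)
    (hgt : xs.getD (j + 1) 0 > 128) (hp : xs.getD j 0 > 128) :
    aStep xs fr ((j + 1 : Nat) : Int) = fr := by
  have hxi : PySem.List.pyGetD xs ((j + 1 : Nat) : Int) 0 = xs.getD (j + 1) 0 :=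
    PySem.List.pyGetD_natCast xs (j + 1) 0
  have hxp : PySem.List.pyGetD xs (((j + 1 : Nat) : Int) - 1) 0 = xs.getD j 0 := by
    rw [pvCastPred, PySem.List.pyGetD_natCast]
  simp only [aStep]
  rw [hxi, hxp]
  split_ifs <;> first | rfl | omega

-- between runs, the element is low: no change
theorem aStep_noop_low (xs : List Int) (fr : List (List Int)) (j : Nat)
    (hle : ¬ xs.getD (j + 1) 0 > 128) (hp : ¬ xs.getD j 0 > 128) :
    aStep xs fr ((j + 1 : Nat) : Int) = fr := by
  have hxi : PySem.List.pyGetD xs ((j + 1 : Nat) : Int) 0 = xs.getD (j + 1) 0 :=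
    PySem.List.pyGetD_natCast xs (j + 1) 0
  have hxp : PySem.List.pyGetD xs (((j + 1 : Nat) : Int) - 1) 0 = xs.getD j 0 := by
    rw [pvCastPred, PySem.List.pyGetD_natCast]
  simp only [aStep]
  rw [hxi, hxp]
  split_ifs <;> first | rfl | omega

-- at index 0 with a low element and empty accumulator: no change (the len-1 ≥ 0 guard fails)
theorem aStep_zero_low (xs : List Int) (hle : ¬ xs.getD 0 0 > 128) :
    aStep xs [] ((0 : Nat) : Int) = [] := by
  have hxi : PySem.List.pyGetD xs ((0 : Nat) : Int) 0 = xs.getD 0 0 :=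
    PySem.List.pyGetD_natCast xs 0 0
  simp only [aStep]
  rw [hxi]
  split_ifs <;> first | rfl | omega | simp_all

-- a run ends at i = j+1: the last pair's end is overwritten with i
theorem aStep_close (xs : List Int) (fr : List (List Int)) (s e : Int) (j : Nat)
    (hle : ¬ xs.getD (j + 1) 0 > 128) (hp : xs.getD j 0 > 128) :
    aStep xs (fr ++ [[s, e]]) ((j + 1 : Nat) : Int) = fr ++ [[s, ((j + 1 : Nat) : Int)]] := by
  have hxi : PySem.List.pyGetD xs ((j + 1 : Nat) : Int) 0 = xs.getD (j + 1) 0 :=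
    PySem.List.pyGetD_natCast xs (j + 1) 0
  have hxp : PySem.List.pyGetD xs (((j + 1 : Nat) : Int) - 1) 0 = xs.getD j 0 := by
    rw [pvCastPred, PySem.List.pyGetD_natCast]
  simp only [aStep]
  rw [hxi, hxp]
  split_ifs <;> first | rfl | omega | simp_all

-- the joint loop invariant: G (between runs) ∧ H (inside a run, after the append)
theorem pvGH (xs : List Int) : ∀ d i, i ≤ xs.length → xs.length - i = d →
    ((∀ fr : List (List Int), (i = 0 → fr = []) → (∀ j : Nat, i = j + 1 → xs.getD j 0 ≤ 128) →
        (PySem.List.pyRange (i : Int) (xs.length : Int) 1).foldl (aStep xs) fr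
          = fr ++ bLoop xs xs.length i)
    ∧ (∀ fr : List (List Int), ∀ s : Int, ∀ j : Nat, i = j + 1 → xs.getD j 0 > 128 →
        (PySem.List.pyRange (i : Int) (xs.length : Int) 1).foldl (aStep xs)
            (fr ++ [[s, (xs.length : Int) - 1]])
          = fr ++ (if bScan xs xs.length i = xs.length then [s, (xs.length : Int) - 1]
                   else [s, ((bScan xs xs.length i : Nat) : Int)])
              :: bLoop xs xs.length (bScan xs xs.length i))) := by
  intro d
  induction d using Nat.strong_induction_on with
  | _ d ih =>
    intro i hi hd
    by_cases hin : i < xs.length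
    · constructor
      · -- G, i < n
        intro fr h0 hprev
        rw [PySem.List.pyRange_one_cons (by exact_mod_cast hin)]
        simp only [List.foldl_cons]
        by_cases hgt : xs.getD i 0 > 128
        · -- run starts at i
          have hprev' : (i : Int) = 0 ∨ PySem.List.pyGetD xs ((i : Int) - 1) 0 ≤ 128 := by
            rcases Nat.eq_zero_or_pos i with hz | hpos
            · exact Or.inl (by exact_mod_cast congrArg (Nat.cast (R := Int)) hz)
            · refine Or.inr ?_
              obtain ⟨j, rfl⟩ : ∃ j, i = j + 1 := ⟨i - 1, by omega⟩
              rw [pvCastPred, PySem.List.pyGetD_natCast]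
              exact hprev j rfl
          rw [aStep_start xs fr i hgt hprev']
          have hc1 : (i : Int) + 1 = ((i + 1 : Nat) : Int) := by push_cast; ring
          rw [hc1]
          have hH := ((ih (xs.length - (i + 1)) (by omega) (i + 1) (by omega) rfl).2)
            fr (i : Int) i rfl hgt
          rw [hH]
          conv_rhs => rw [bLoop]
          rw [dif_pos hin, dif_pos hgt, bScan_step xs xs.length i hin hgt]
        · -- xs.getD i 0 ≤ 128: step is a no-op
          have hstep : aStep xs fr (i : Int) = fr := by
            rcases Nat.eq_zero_or_pos i with hz | hpos
            · subst hz; rw [h0 rfl]; exact aStep_zero_low xs hgt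
            · obtain ⟨j, rfl⟩ : ∃ j, i = j + 1 := ⟨i - 1, by omega⟩
              exact aStep_noop_low xs fr j hgt (by have := hprev j rfl; omega)
          rw [hstep]
          have hc1 : (i : Int) + 1 = ((i + 1 : Nat) : Int) := by push_cast; ring
          rw [hc1]
          have hG := ((ih (xs.length - (i + 1)) (by omega) (i + 1) (by omega) rfl).1)
            fr (by omega) (by intro j hj
                              have : j = i := by omega
                              subst this; omega)
          rw [hG]
          conv_rhs => rw [bLoop]
          rw [dif_pos hin, dif_neg hgt]
      · -- H, i < n
        intro fr s j hij hjgt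
        subst hij
        rw [PySem.List.pyRange_one_cons (by exact_mod_cast hin)]
        simp only [List.foldl_cons]
        by_cases hgt : xs.getD (j + 1) 0 > 128
        · -- run continues: step is a no-op
          rw [aStep_noop_high xs (fr ++ [[s, (xs.length : Int) - 1]]) j hgt hjgt]
          have hc1 : ((j + 1 : Nat) : Int) + 1 = ((j + 1 + 1 : Nat) : Int) := by push_cast; ring
          rw [hc1]
          have hH := ((ih (xs.length - (j + 1 + 1)) (by omega) (j + 1 + 1) (by omega) rfl).2)
            fr s (j + 1) rfl hgt
          rw [hH, bScan_step xs xs.length (j + 1) hin hgt]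
        · -- run ends at i = j+1
          rw [aStep_close xs fr s ((xs.length : Int) - 1) j hgt hjgt]
          have hc1 : ((j + 1 : Nat) : Int) + 1 = ((j + 1 + 1 : Nat) : Int) := by push_cast; ring
          rw [hc1]
          have hG := ((ih (xs.length - (j + 1 + 1)) (by omega) (j + 1 + 1) (by omega) rfl).1)
            (fr ++ [[s, ((j + 1 : Nat) : Int)]]) (by omega)
            (by intro k hk
                have : k = j + 1 := by omega
                subst this; omega)
          rw [hG]
          have hsc : bScan xs xs.length (j + 1) = j + 1 :=
            bScan_stop xs xs.length (j + 1) (by intro hc; exact hgt hc.2)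
          rw [hsc, if_neg (by omega)]
          conv_rhs => rw [bLoop]
          rw [dif_pos hin, dif_neg hgt]
          simp
    · -- i = n base case
      have hieq : i = xs.length := by omega
      subst hieq
      constructor
      · intro fr _ _
        rw [PySem.List.pyRange_one_eq_nil le_rfl, bLoop,
            dif_neg (by omega : ¬ xs.length < xs.length)]
        simp
      · intro fr s j _ _
        rw [PySem.List.pyRange_one_eq_nil le_rfl]
        have hsc : bScan xs xs.length xs.length = xs.length :=
          bScan_stop xs xs.length xs.length (by omega)
        rw [hsc, if_pos rfl, bLoop, dif_neg (by omega : ¬ xs.length < xs.length)]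
        simp

-- ===== VERDICT (by name: the statement is the Claim_ definition above) =====
theorem compute_fringes_from_profile_spec : Claim_equal_compute_fringes_from_profile := by
  intro detection _
  unfold Spec_compute_fringes_from_profile compute_fringes_from_profile
    compute_fringes_from_profile_alt
  have hG := ((pvGH detection (detection.length - 0) 0 (by omega) rfl).1)
    [] (fun _ => rfl) (by intro j hj; omega)
  simpa using hG
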